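-- pv_equiv track=rewrite | github.com/martinmathew/CV | IdentifyingTraffic Signs and Lights/ps02/ps2.py | findcircles_nearby
-- ===== SOURCE A (Python) =====
-- import math
--
-- def linelength(line):
--     x1 = line[0]
--     y1 = line[1]
--     x2 = line[2]
--     y2 = line[3]
--     return math.sqrt((x1 - x2) ** 2 + (y1 - y2) ** 2)
--
-- def findcircles_nearby(circles, dist, radius):
--     for i in range(len(circles)):
--         circle1 = circles[i]
--         list = []
--         for j in range(len(circles)):
--             if i == j:
--                 continue
--             circle2 = circles[j]
--             if linelength((circle1[0], circle1[1], circle2[0], circle2[1])) < dist and abs(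
--                     circle1[2] - circle2[2]) < radius:
--                 list.append(circle2)
--         if len(list) == 2:
--             return circle1
--     return None
-- ===== SOURCE B (Python) =====
-- import math
--
-- def _similar(c1, c2, dist, radius):
--     return (math.sqrt((c1[0] - c2[0]) ** 2 + (c1[1] - c2[1]) ** 2) < dist
--             and abs(c1[2] - c2[2]) < radius)
--
-- def findcircles_nearby(circles, dist, radius):
--     n = len(circles)
--     counts = [0] * n
--     for i in range(n):
--         for j in range(i + 1, n):
--             if _similar(circles[i], circles[j], dist, radius):
--                 counts[i] += 1
--                 counts[j] += 1
--     for i in range(n):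
--         if counts[i] == 2:
--             return circles[i]
--     return None
-- ===== Notes on version B (the rewrite author's own statement) =====
-- stated objective: faster
-- what changed: B replaces A's per-circle rescan of the whole list (computing each circle's full neighbour list from scratch) by a single pass over unordered pairs i<j that builds a neighbour-count table, exploiting symmetry of the similarity predicate, followed by one scan for the first count equal to 2.
import Mathlib
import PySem

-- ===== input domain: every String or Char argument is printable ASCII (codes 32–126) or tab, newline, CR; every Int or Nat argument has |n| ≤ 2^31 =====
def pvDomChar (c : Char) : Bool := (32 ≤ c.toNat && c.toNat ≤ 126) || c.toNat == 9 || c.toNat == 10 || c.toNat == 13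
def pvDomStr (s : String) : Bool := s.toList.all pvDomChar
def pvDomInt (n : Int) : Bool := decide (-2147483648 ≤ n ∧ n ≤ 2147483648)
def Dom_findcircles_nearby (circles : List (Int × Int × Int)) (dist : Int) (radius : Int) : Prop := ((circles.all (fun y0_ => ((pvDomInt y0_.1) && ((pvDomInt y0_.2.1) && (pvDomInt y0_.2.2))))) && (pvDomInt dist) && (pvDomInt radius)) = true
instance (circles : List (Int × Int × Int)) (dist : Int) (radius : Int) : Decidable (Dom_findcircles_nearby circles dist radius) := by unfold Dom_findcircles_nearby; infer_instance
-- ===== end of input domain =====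

-- B builds a neighbor-count table over unordered pairs once (halving the similarity tests),
-- then scans it, instead of A's per-circle rescan of the whole list; same return value proved.

-- Shared float-exact primitive: models Python's `math.sqrt(s) < d` for an integer s ≥ 0 and an
-- integer d (exact for |d| ≤ 2^31 and s ≤ 2^66, which covers the domain: CPython rounds s to the
-- nearest double, takes the correctly rounded sqrt, and compares exactly against the int d; since
-- sqrt of an integer is never a rounding midpoint below 2^52, the comparison is `√(round53 s) < m`
-- with m the midpoint between d and its predecessor double, decided here in exact integers).
def pyRound53 (s : Nat) : Nat :=
  if s < 2 ^ 53 then s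
  else
    let e : Nat := PySem.Int.bitLength (s : Int) - 1
    let q : Nat := 2 ^ (e - 52)
    let r : Nat := s % q
    let base : Nat := s - r
    if r > q / 2 ∨ (r = q / 2 ∧ (base / q) % 2 = 1) then base + q else base

def pySqrtLt (s : Nat) (d : Int) : Bool :=
  if d ≤ 0 then false
  else
    let dn : Nat := d.toNat
    let e : Nat := PySem.Int.bitLength d - 1
    let p : Nat := if dn = 2 ^ e then 54 - e else 53 - e
    decide (pyRound53 s * 2 ^ (2 * p) < (dn * 2 ^ p - 1) ^ 2)

-- ===== PORT A =====
def pvDefC : Int × Int × Int := (0, 0, 0)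

-- inner `for j in range(len(circles))` building `list`
def innerA (circles : List (Int × Int × Int)) (dist radius : Int)
    (c1 : Int × Int × Int) (i : Nat) : List (Int × Int × Int) :=
  (List.range circles.length).foldl
    (fun acc j =>
      if i = j then acc
      else if pySqrtLt ((c1.1 - (circles.getD j pvDefC).1) ^ 2
              + (c1.2.1 - (circles.getD j pvDefC).2.1) ^ 2).toNat dist
             && decide (|c1.2.2 - (circles.getD j pvDefC).2.2| < radius)
           then acc ++ [circles.getD j pvDefC] else acc)
    []

-- outer `for i in range(len(circles))` with early return
def outerA (circles : List (Int × Int × Int)) (dist radius : Int) :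
    List Nat → Option (Int × Int × Int)
  | [] => none
  | i :: is =>
    if (innerA circles dist radius (circles.getD i pvDefC) i).length = 2
    then some (circles.getD i pvDefC)
    else outerA circles dist radius is

def findcircles_nearby (circles : List (Int × Int × Int)) (dist : Int) (radius : Int) :
    Option (Int × Int × Int) :=
  outerA circles dist radius (List.range circles.length)

-- ===== PORT B =====
-- Source B's `_similar`
def similarB (c1 c2 : Int × Int × Int) (dist radius : Int) : Bool :=
  pySqrtLt ((c1.1 - c2.1) ^ 2 + (c1.2.1 - c2.2.1) ^ 2).toNat dist
    && decide (|c1.2.2 - c2.2.2| < radius)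

-- the pair loop building `counts`
def bCounts (circles : List (Int × Int × Int)) (dist radius : Int) : List Nat :=
  (List.range circles.length).foldl
    (fun counts i =>
      (List.range' (i + 1) (circles.length - (i + 1))).foldl
        (fun cs j =>
          if similarB (circles.getD i pvDefC) (circles.getD j pvDefC) dist radius
          then (cs.set i (cs.getD i 0 + 1)).set j (cs.getD j 0 + 1)
          else cs)
        counts)
    (List.replicate circles.length 0)

-- the final scan `for i in range(n): if counts[i] == 2: return circles[i]`
def bScan (circles : List (Int × Int × Int)) (counts : List Nat) :
    List Nat → Option (Int × Int × Int)
  | [] => none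
  | i :: is =>
    if counts.getD i 0 = 2 then some (circles.getD i pvDefC)
    else bScan circles counts is

def findcircles_nearby_alt (circles : List (Int × Int × Int)) (dist : Int) (radius : Int) :
    Option (Int × Int × Int) :=
  bScan circles (bCounts circles dist radius) (List.range circles.length)

-- ===== PRECONDITION & SPEC =====
def Spec_findcircles_nearby (circles : List (Int × Int × Int)) (dist : Int) (radius : Int) (out : Option (Int × Int × Int)) : Prop := out = findcircles_nearby_alt circles dist radius
instance (circles : List (Int × Int × Int)) (dist : Int) (radius : Int) (out : Option (Int × Int × Int)) : Decidable (Spec_findcircles_nearby circles dist radius out) := by unfold Spec_findcircles_nearby; infer_instance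

-- ===== CLAIM (what is proved, stated in full; the proofs are below) =====
def Claim_equal_findcircles_nearby : Prop := ∀ (circles : List (Int × Int × Int)) (dist : Int) (radius : Int), Dom_findcircles_nearby circles dist radius → Spec_findcircles_nearby circles dist radius (findcircles_nearby circles dist radius)

-- ===== LEMMAS AND PROOFS =====

-- similarity between positions i, j of the list (used only by the proofs)
def simIx (circles : List (Int × Int × Int)) (dist radius : Int) (i j : Nat) : Bool :=
  similarB (circles.getD i pvDefC) (circles.getD j pvDefC) dist radius

lemma simIx_symm (circles : List (Int × Int × Int)) (dist radius : Int) (i j : Nat) :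
    simIx circles dist radius i j = simIx circles dist radius j i := by
  unfold simIx similarB
  have h1 : ((circles.getD i pvDefC).1 - (circles.getD j pvDefC).1) ^ 2
      + ((circles.getD i pvDefC).2.1 - (circles.getD j pvDefC).2.1) ^ 2
      = ((circles.getD j pvDefC).1 - (circles.getD i pvDefC).1) ^ 2
      + ((circles.getD j pvDefC).2.1 - (circles.getD i pvDefC).2.1) ^ 2 := by ring
  rw [h1, abs_sub_comm]

-- A's inner loop body, rewritten to the filter-append shape
lemma innerA_body (circles : List (Int × Int × Int)) (dist radius : Int) (i : Nat) :
    (fun (acc : List (Int × Int × Int)) (j : Nat) =>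
      if i = j then acc
      else if pySqrtLt (((circles.getD i pvDefC).1 - (circles.getD j pvDefC).1) ^ 2
              + ((circles.getD i pvDefC).2.1 - (circles.getD j pvDefC).2.1) ^ 2).toNat dist
             && decide (|(circles.getD i pvDefC).2.2 - (circles.getD j pvDefC).2.2| < radius)
           then acc ++ [circles.getD j pvDefC] else acc)
    = (fun acc j =>
        if (decide (i ≠ j) && simIx circles dist radius i j)
        then acc ++ [circles.getD j pvDefC] else acc) := by
  funext acc j
  by_cases hij : i = j
  · rw [if_pos hij]
    have h : (decide (i ≠ j) && simIx circles dist radius i j) = false := by simp [hij]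
    rw [h]
    rfl
  · rw [if_neg hij]
    have h : decide (i ≠ j) = true := by simp [hij]
    rw [h, Bool.true_and]
    rfl

-- A's inner list has length = number of indices j ≠ i similar to i
lemma innerA_length (circles : List (Int × Int × Int)) (dist radius : Int) (i : Nat) :
    (innerA circles dist radius (circles.getD i pvDefC) i).length
      = ((List.range circles.length).filter
          (fun j => decide (i ≠ j) && simIx circles dist radius i j)).length := by
  unfold innerA
  rw [innerA_body, PySem.List.foldl_append_if, List.nil_append, List.length_map]

-- entry k of `(l.set i v)` read with getD
lemma getD_set_of_lt (l : List Nat) (i k v : Nat) (hi : i < l.length) :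
    (l.set i v).getD k 0 = if k = i then v else l.getD k 0 := by
  rcases eq_or_ne k i with h | h
  · subst h
    simp [List.getD_eq_getElem?_getD, List.getElem?_set, hi]
  · simp [List.getD_eq_getElem?_getD, List.getElem?_set, h, Ne.symm h]

-- the count B should hold at index k after the whole pair loop
def nbrCnt (circles : List (Int × Int × Int)) (dist radius : Int) (k : Nat) : Nat :=
  ((List.range circles.length).filter
    (fun j => decide (k ≠ j) && simIx circles dist radius k j)).length

-- the counts-table entry k after the outer loop has processed i ∈ range m
def cntAt (circles : List (Int × Int × Int)) (dist radius : Int) (m k : Nat) : Nat :=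
  ((List.range (min m k)).filter (fun i => simIx circles dist radius i k)).length
    + (if k < m then
        ((List.range' (k + 1) (circles.length - (k + 1))).filter
          (fun j => simIx circles dist radius k j)).length
       else 0)

-- effect of one inner pass (fixed outer index i) on entry k of the counts list
lemma inner_fold_getD (circles : List (Int × Int × Int)) (dist radius : Int) (i : Nat) :
    ∀ (J : List Nat) (counts : List Nat), counts.length = circles.length →
      i < circles.length →
      (∀ j ∈ J, i < j ∧ j < circles.length) → J.Nodup →
      ∀ k,
      ((J.foldl (fun cs j =>
          if similarB (circles.getD i pvDefC) (circles.getD j pvDefC) dist radius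
          then (cs.set i (cs.getD i 0 + 1)).set j (cs.getD j 0 + 1)
          else cs) counts).getD k 0)
        = counts.getD k 0 +
          (if k = i then (J.filter (fun j => simIx circles dist radius i j)).length
           else if k ∈ J ∧ simIx circles dist radius i k = true then 1 else 0) := by
  intro J
  induction J with
  | nil => intro counts _ _ _ _ k; simp
  | cons j J ih =>
    intro counts hlen hi hmem hnd k
    have hij : i < j := (hmem j (by simp)).1
    have hjn : j < circles.length := (hmem j (by simp)).2
    have hij' : i ≠ j := Nat.ne_of_lt hij
    have hnd' : J.Nodup := (List.nodup_cons.mp hnd).2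
    have hjJ : j ∉ J := (List.nodup_cons.mp hnd).1
    by_cases hs : simIx circles dist radius i j = true
    · have hs' : similarB (circles.getD i pvDefC) (circles.getD j pvDefC) dist radius = true := hs
      have hlen' : ((counts.set i (counts.getD i 0 + 1)).set j (counts.getD j 0 + 1)).length
          = circles.length := by simp [hlen]
      rw [List.foldl_cons, if_pos hs',
        ih _ hlen' hi (fun x hx => hmem x (by simp [hx])) hnd' k]
      have hgetD : ((counts.set i (counts.getD i 0 + 1)).set j (counts.getD j 0 + 1)).getD k 0
          = counts.getD k 0 + ((if k = i then 1 else 0) + (if k = j then 1 else 0)) := by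
        rw [getD_set_of_lt _ j k _ (by simp only [List.length_set, hlen]; exact hjn),
          getD_set_of_lt _ i k _ (by rw [hlen]; exact hi)]
        rcases eq_or_ne k j with hkj | hkj
        · subst hkj
          simp [Ne.symm hij']
        · rcases eq_or_ne k i with hki | hki
          · subst hki
            simp [hkj]
          · simp [hkj, hki]
      rw [hgetD]
      rcases eq_or_ne k i with hki | hki
      · subst hki
        simp [List.filter_cons, hs, hij'] <;> omega
      · rcases eq_or_ne k j with hkj | hkj
        · subst hkj
          have h1 : ¬ (k ∈ J ∧ simIx circles dist radius i k = true) := fun h => hjJ h.1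
          simp [hki, h1, hs, hjJ] <;> omega
        · have hiff : (k ∈ j :: J ∧ simIx circles dist radius i k = true)
              ↔ (k ∈ J ∧ simIx circles dist radius i k = true) := by
            constructor
            · rintro ⟨h1, h2⟩
              exact ⟨(List.mem_cons.mp h1).resolve_left hkj, h2⟩
            · rintro ⟨h1, h2⟩
              exact ⟨List.mem_cons.mpr (Or.inr h1), h2⟩
          simp only [if_neg hki, if_neg hkj, hiff]
          omega
    · have hsf : simIx circles dist radius i j = false := by simpa using hs
      have hsneg : ¬ (similarB (circles.getD i pvDefC) (circles.getD j pvDefC) dist radius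
          = true) := by
        intro h
        exact hs h
      rw [List.foldl_cons, if_neg hsneg,
        ih _ hlen hi (fun x hx => hmem x (by simp [hx])) hnd' k]
      rcases eq_or_ne k i with hki | hki
      · subst hki
        simp [List.filter_cons, hsf]
      · have hiff : (k ∈ j :: J ∧ simIx circles dist radius i k = true)
            ↔ (k ∈ J ∧ simIx circles dist radius i k = true) := by
          constructor
          · rintro ⟨h1, h2⟩
            rcases List.mem_cons.mp h1 with h | h
            · subst h
              exact absurd h2 hs
            · exact ⟨h, h2⟩
          · rintro ⟨h1, h2⟩
            exact ⟨List.mem_cons.mpr (Or.inr h1), h2⟩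
        simp only [if_neg hki, hiff]

-- the inner fold preserves the length of the counts list
lemma inner_fold_length (circles : List (Int × Int × Int)) (dist radius : Int) (i : Nat) :
    ∀ (J : List Nat) (counts : List Nat),
      (J.foldl (fun cs j =>
          if similarB (circles.getD i pvDefC) (circles.getD j pvDefC) dist radius
          then (cs.set i (cs.getD i 0 + 1)).set j (cs.getD j 0 + 1)
          else cs) counts).length = counts.length := by
  intro J
  induction J with
  | nil => intro counts; rfl
  | cons j J ih =>
    intro counts
    rw [List.foldl_cons]
    by_cases hs : similarB (circles.getD i pvDefC) (circles.getD j pvDefC) dist radius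
    · rw [if_pos hs, ih]; simp
    · rw [if_neg hs, ih]

-- outer loop invariant: after processing i ∈ range m, entry k holds cntAt m k
lemma outer_fold_getD (circles : List (Int × Int × Int)) (dist radius : Int) :
    ∀ (m : Nat), m ≤ circles.length →
      ((List.range m).foldl (fun counts i =>
          (List.range' (i + 1) (circles.length - (i + 1))).foldl
            (fun cs j =>
              if similarB (circles.getD i pvDefC) (circles.getD j pvDefC) dist radius
              then (cs.set i (cs.getD i 0 + 1)).set j (cs.getD j 0 + 1)
              else cs) counts)
        (List.replicate circles.length 0)).length = circles.length ∧
      ∀ k, k < circles.length →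
      (((List.range m).foldl (fun counts i =>
          (List.range' (i + 1) (circles.length - (i + 1))).foldl
            (fun cs j =>
              if similarB (circles.getD i pvDefC) (circles.getD j pvDefC) dist radius
              then (cs.set i (cs.getD i 0 + 1)).set j (cs.getD j 0 + 1)
              else cs) counts)
        (List.replicate circles.length 0)).getD k 0) = cntAt circles dist radius m k := by
  intro m
  induction m with
  | zero =>
    intro _
    refine ⟨by simp, ?_⟩
    intro k hk
    simp [cntAt]
  | succ m ih =>
    intro hm
    have hm' : m ≤ circles.length := Nat.le_of_succ_le hm
    have hmlt : m < circles.length := hm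
    obtain ⟨ihlen, ihval⟩ := ih hm'
    rw [List.range_succ]
    constructor
    · rw [List.foldl_append, List.foldl_cons, List.foldl_nil, inner_fold_length]
      exact ihlen
    · intro k hk
      rw [List.foldl_append, List.foldl_cons, List.foldl_nil]
      have hJ : ∀ j ∈ List.range' (m + 1) (circles.length - (m + 1)),
          m < j ∧ j < circles.length := by
        intro j hj
        rw [List.mem_range'] at hj
        obtain ⟨x, hx, hj⟩ := hj
        omega
      rw [inner_fold_getD circles dist radius m _ _ ihlen hmlt hJ List.nodup_range' k,
        ihval k hk]
      unfold cntAt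
      rcases eq_or_ne k m with hki | hki
      · subst hki
        have h2 : min (k + 1) k = k := by omega
        rw [Nat.min_self, h2]
        simp
        try omega
      · rw [if_neg hki]
        by_cases hkm : k < m
        · have h1 : min m k = k := by omega
          have h2 : min (m + 1) k = k := by omega
          have hnin : ¬ (k ∈ List.range' (m + 1) (circles.length - (m + 1))
              ∧ simIx circles dist radius m k = true) := by
            rintro ⟨h, -⟩
            rw [List.mem_range'] at h
            obtain ⟨x, hx, hkx⟩ := h
            omega
          rw [h1, h2]
          simp only [if_pos hkm, if_pos (show k < m + 1 by omega), if_neg hnin]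
          omega
        · have hmk : m < k := by omega
          have h1 : min m k = m := by omega
          have h2 : min (m + 1) k = m + 1 := by omega
          have hin : k ∈ List.range' (m + 1) (circles.length - (m + 1)) := by
            rw [List.mem_range']
            exact ⟨k - (m + 1), by omega, by omega⟩
          have hif : ([m].filter (fun i => simIx circles dist radius i k)).length
              = (if k ∈ List.range' (m + 1) (circles.length - (m + 1))
                  ∧ simIx circles dist radius m k = true then 1 else 0) := by
            by_cases hs : simIx circles dist radius m k = true
            · rw [if_pos ⟨hin, hs⟩]
              simp [hs]
            · rw [if_neg (fun h => hs h.2)]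
              simp only [List.filter_cons, List.filter_nil]
              rw [if_neg hs]
              rfl
          rw [h1, h2, List.range_succ, List.filter_append, List.length_append, hif]
          simp only [if_neg (show ¬ k < m by omega), if_neg (show ¬ k < m + 1 by omega)]
          omega

-- entry k of bCounts is the full neighbour count of k
lemma bCounts_getD (circles : List (Int × Int × Int)) (dist radius : Int) (k : Nat)
    (hk : k < circles.length) :
    (bCounts circles dist radius).getD k 0 = nbrCnt circles dist radius k := by
  unfold bCounts
  rw [(outer_fold_getD circles dist radius circles.length le_rfl).2 k hk]
  unfold cntAt nbrCnt
  have hmin : min circles.length k = k := by omega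
  rw [hmin, if_pos hk]
  have hsp1 : List.range' 0 circles.length
      = List.range' 0 (k + 1) ++ List.range' (k + 1) (circles.length - (k + 1)) := by
    have h : List.range' 0 (k + 1) ++ List.range' (0 + (k + 1)) (circles.length - (k + 1))
        = List.range' 0 ((k + 1) + (circles.length - (k + 1))) := List.range'_append_1
    rw [Nat.zero_add] at h
    rw [h]
    congr 1
    omega
  have hsplit : List.range circles.length
      = (List.range k ++ [k]) ++ List.range' (k + 1) (circles.length - (k + 1)) := by
    rw [← List.range_succ, List.range_eq_range', List.range_eq_range']
    exact hsp1
  rw [hsplit, List.filter_append, List.filter_append, List.length_append, List.length_append]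
  have hmid : ([k].filter (fun j => decide (k ≠ j) && simIx circles dist radius k j)).length
      = 0 := by simp
  have hlo : (List.range k).filter (fun j => decide (k ≠ j) && simIx circles dist radius k j)
      = (List.range k).filter (fun i => simIx circles dist radius i k) := by
    apply List.filter_congr
    intro j hj
    rw [List.mem_range] at hj
    have hne : k ≠ j := by omega
    simp [hne, simIx_symm circles dist radius k j]
  have hhi : (List.range' (k + 1) (circles.length - (k + 1))).filter
        (fun j => decide (k ≠ j) && simIx circles dist radius k j)
      = (List.range' (k + 1) (circles.length - (k + 1))).filter
        (fun j => simIx circles dist radius k j) := by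
    apply List.filter_congr
    intro j hj
    rw [List.mem_range'] at hj
    obtain ⟨x, hx, hj⟩ := hj
    have hne : k ≠ j := by omega
    simp [hne]
  rw [hmid, hlo, hhi]
  omega

-- the two scans agree step by step
lemma scan_eq (circles : List (Int × Int × Int)) (dist radius : Int) :
    ∀ (is : List Nat), (∀ i ∈ is, i < circles.length) →
      outerA circles dist radius is
        = bScan circles (bCounts circles dist radius) is := by
  intro is
  induction is with
  | nil => intro _; rfl
  | cons i is ih =>
    intro hmem
    have hi : i < circles.length := hmem i (by simp)
    show (if (innerA circles dist radius (circles.getD i pvDefC) i).length = 2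
            then some (circles.getD i pvDefC) else outerA circles dist radius is)
        = (if (bCounts circles dist radius).getD i 0 = 2
            then some (circles.getD i pvDefC)
            else bScan circles (bCounts circles dist radius) is)
    rw [innerA_length, bCounts_getD circles dist radius i hi]
    unfold nbrCnt
    by_cases h : ((List.range circles.length).filter
        (fun j => decide (i ≠ j) && simIx circles dist radius i j)).length = 2
    · rw [if_pos h, if_pos h]
    · rw [if_neg h, if_neg h]
      exact ih (fun x hx => hmem x (by simp [hx]))

-- ===== VERDICT (by name: the statement is the Claim_ definition above) =====
theorem findcircles_nearby_spec : Claim_equal_findcircles_nearby := by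
  intro circles dist radius _
  unfold Spec_findcircles_nearby findcircles_nearby findcircles_nearby_alt
  exact scan_eq circles dist radius (List.range circles.length)
    (fun i hi => List.mem_range.mp hi)
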